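-- pv_equiv track=rewrite | github.com/cloudcj/iam | apps/authz/service/authorization_service.py | group_permissions_by_system
-- ===== SOURCE A (Python) =====
-- def group_permissions_by_system(permission_codes: set[str]) -> dict:
--     grouped: dict[str, list[str]] = {}
--
--     for code in permission_codes:
--         parts = code.split(".", 1)
--         if len(parts) != 2:
--             continue
--
--         system, remainder = parts
--
--         grouped.setdefault(system, []).append(remainder)
--
--     return {
--         system: sorted(perms)
--         for system, perms in grouped.items()
--     }
-- ===== SOURCE B (Python) =====
-- def _insert_sorted(bucket, item):
--     i = 0
--     while i < len(bucket) and bucket[i] <= item: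
--         i += 1
--     bucket.insert(i, item)
--
--
-- def group_permissions_by_system(permission_codes):
--     grouped = {}
--     for code in permission_codes:
--         parts = code.split(".", 1)
--         if len(parts) == 2:
--             _insert_sorted(grouped.setdefault(parts[0], []), parts[1])
--     return grouped
-- ===== Notes on version B (the rewrite author's own statement) =====
-- stated objective: alternative
-- what changed: A appends remainders per bucket and then sorts every bucket in a second dict-comprehension pass; B keeps each bucket sorted throughout a single pass by inserting every remainder directly at its sorted position, so no sorting pass over the grouped dict remains.
import Mathlib
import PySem

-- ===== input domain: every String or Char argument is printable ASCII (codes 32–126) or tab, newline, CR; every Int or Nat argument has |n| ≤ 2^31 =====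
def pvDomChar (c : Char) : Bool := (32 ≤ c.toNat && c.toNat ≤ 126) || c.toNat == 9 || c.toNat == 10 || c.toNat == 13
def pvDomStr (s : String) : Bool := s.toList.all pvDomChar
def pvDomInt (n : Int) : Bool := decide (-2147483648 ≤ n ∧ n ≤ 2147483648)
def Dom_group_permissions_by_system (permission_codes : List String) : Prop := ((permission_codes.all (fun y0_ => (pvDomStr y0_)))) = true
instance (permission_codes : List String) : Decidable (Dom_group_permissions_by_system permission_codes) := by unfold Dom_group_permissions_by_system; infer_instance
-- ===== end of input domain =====

-- B replaces A's group-then-sort-each-bucket (append + per-bucket sorted) with a single pass that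
-- keeps every bucket sorted as it goes, inserting each remainder at its sorted position (objective: alternative).

-- ===== PORT A =====
def group_permissions_by_system (permission_codes : List String) : List (String × List String) :=
  let grouped : PySem.Dict String (List String) :=
    permission_codes.foldl (fun d code =>
      let parts := (PySem.Str.splitMax? code "." 1).getD []
      if parts.length ≠ 2 then d
      else
        let system := parts.getD 0 ""
        let remainder := parts.getD 1 ""
        d.modify system [] (fun b => b ++ [remainder])) PySem.Dict.empty
  grouped.items.map (fun p => (p.1, PySem.List.sorted p.2 (fun x => x) false))

-- ===== PORT B =====
-- _insert_sorted: walk to the first element greater than item, insert there (in-place list insert)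
def pvInsortStep (item : String) : List String → List String
  | [] => [item]
  | y :: ys => if y ≤ item then y :: pvInsortStep item ys else item :: y :: ys

def group_permissions_by_system_alt (permission_codes : List String) : List (String × List String) :=
  (permission_codes.foldl (fun d code =>
      let parts := (PySem.Str.splitMax? code "." 1).getD []
      if parts.length = 2 then
        d.modify (parts.getD 0 "") [] (fun b => pvInsortStep (parts.getD 1 "") b)
      else d) (PySem.Dict.empty : PySem.Dict String (List String))).items

-- ===== PRECONDITION & SPEC =====
def Spec_group_permissions_by_system (permission_codes : List String) (out : List (String × List String)) : Prop := out = group_permissions_by_system_alt permission_codes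
instance (permission_codes : List String) (out : List (String × List String)) : Decidable (Spec_group_permissions_by_system permission_codes out) := by unfold Spec_group_permissions_by_system; infer_instance

-- ===== CLAIM (what is proved, stated in full; the proofs are below) =====
def Claim_equal_group_permissions_by_system : Prop := ∀ (permission_codes : List String), Dom_group_permissions_by_system permission_codes → Spec_group_permissions_by_system permission_codes (group_permissions_by_system permission_codes)

-- ===== LEMMAS AND PROOFS =====

-- running pvInsortStep over a list from [] is exactly Python's sorted
theorem pvInsortStep_eq_insertBy (x : String) (l : List String) :
    pvInsortStep x l = PySem.List.insertBy (fun a b => decide (a < b)) x l := by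
  induction l with
  | nil => simp [pvInsortStep, PySem.List.insertBy]
  | cons y ys ih =>
      by_cases h : y ≤ x
      · simp [pvInsortStep, PySem.List.insertBy, h, not_lt.mpr h, ih]
      · simp [pvInsortStep, PySem.List.insertBy, h, not_le.mp h]

def pvIns (v : List String) : List String := v.foldl (fun acc x => pvInsortStep x acc) []

theorem pvIns_eq_sorted (v : List String) :
    pvIns v = PySem.List.sorted v (fun x => x) false := by
  rw [PySem.List.sorted_eq_foldl_insertBy]
  simp only [pvIns, pvInsortStep_eq_insertBy]

-- map pvIns over the values of a dict
def pvMapV (d : PySem.Dict String (List String)) : PySem.Dict String (List String) :=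
  PySem.Dict.mk (d.items.map (fun p => (p.1, pvIns p.2)))

theorem contains_pvMapV (d : PySem.Dict String (List String)) (k : String) :
    (pvMapV d).contains k = d.contains k := by
  simp only [pvMapV, PySem.Dict.contains, List.any_map]
  rfl

theorem getD_pvMapV (d : PySem.Dict String (List String)) (k : String) :
    (pvMapV d).getD k [] = pvIns (d.getD k []) := by
  simp only [pvMapV, PySem.Dict.getD, PySem.Dict.get?, List.find?_map]
  have : ((fun p : String × List String => p.1 == k) ∘ (fun p : String × List String => (p.1, pvIns p.2)))
      = (fun p : String × List String => p.1 == k) := rfl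
  rw [this]
  cases List.find? (fun p : String × List String => p.1 == k) d.1 with
  | none => simp [pvIns]
  | some p => simp

theorem insert_pvMapV (d : PySem.Dict String (List String)) (k : String) (v : List String) :
    (pvMapV d).insert k (pvIns v) = pvMapV (d.insert k v) := by
  simp only [PySem.Dict.insert, contains_pvMapV]
  by_cases h : d.contains k
  · simp only [h, if_true, pvMapV, List.map_map]
    congr 1
    apply List.map_congr_left
    intro p _
    by_cases hp : p.1 == k <;> simp [hp, Function.comp]
  · simp [h, pvMapV]

theorem pvIns_append (w : List String) (r : String) :
    pvIns (w ++ [r]) = pvInsortStep r (pvIns w) := by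
  simp [pvIns, List.foldl_append]

theorem pvStep_comm (code : String) (d : PySem.Dict String (List String)) :
    (let parts := (PySem.Str.splitMax? code "." 1).getD []
     if parts.length = 2 then
       (pvMapV d).modify (parts.getD 0 "") [] (fun b => pvInsortStep (parts.getD 1 "") b)
     else pvMapV d)
    = pvMapV
      (let parts := (PySem.Str.splitMax? code "." 1).getD []
       if parts.length ≠ 2 then d
       else
         let system := parts.getD 0 ""
         let remainder := parts.getD 1 ""
         d.modify system [] (fun b => b ++ [remainder])) := by
  set parts := (PySem.Str.splitMax? code "." 1).getD [] with hp
  by_cases h : parts.length = 2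
  · simp only [h, if_true, ne_eq, not_true_eq_false, if_false, PySem.Dict.modify,
      getD_pvMapV, ← pvIns_append, insert_pvMapV]
  · simp [h]

theorem pvFold_comm (codes : List String) (d : PySem.Dict String (List String)) :
    codes.foldl (fun d code =>
      let parts := (PySem.Str.splitMax? code "." 1).getD []
      if parts.length = 2 then
        d.modify (parts.getD 0 "") [] (fun b => pvInsortStep (parts.getD 1 "") b)
      else d) (pvMapV d)
    = pvMapV (codes.foldl (fun d code =>
      let parts := (PySem.Str.splitMax? code "." 1).getD []
      if parts.length ≠ 2 then d
      else
        let system := parts.getD 0 ""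
        let remainder := parts.getD 1 ""
        d.modify system [] (fun b => b ++ [remainder])) d) := by
  induction codes generalizing d with
  | nil => rfl
  | cons c cs ih =>
      simp only [List.foldl_cons]
      rw [pvStep_comm c d]
      exact ih _

theorem pvMapV_empty : pvMapV PySem.Dict.empty = PySem.Dict.empty := rfl

-- ===== VERDICT (by name: the statement is the Claim_ definition above) =====
theorem group_permissions_by_system_spec : Claim_equal_group_permissions_by_system := by
  intro codes _
  unfold Spec_group_permissions_by_system group_permissions_by_system group_permissions_by_system_alt
  rw [← pvMapV_empty, pvFold_comm]
  simp only [pvMapV]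
  apply List.map_congr_left
  intro p _
  rw [pvIns_eq_sorted]
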